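-- pv_equiv track=rewrite | github.com/ItoSchum/myLeetCode | 2019-07-16/34.find-first-and-last-position-of-element-in-sorted-array.py | searchBoundary
-- ===== SOURCE A (Python) =====
-- from typing import List
--
-- def searchBoundary(nums: List[int], target: int, isSearchingLeftBoundary: bool):
--     nums_len = len(nums)
--     leading_index = 0
--     ending_index_plus = nums_len
--
--     while leading_index < ending_index_plus:
--         middle_index = (leading_index + ending_index_plus) // 2
--
--         if nums[middle_index] > target or (nums[middle_index] == target and isSearchingLeftBoundary is True):
--             ending_index_plus = middle_index
--         else:
--             leading_index = middle_index + 1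
--
--     return leading_index
-- ===== SOURCE B (Python) =====
-- def searchBoundary(nums, target, isSearchingLeftBoundary):
--     def go(lo, n):
--         # search within the window of length n starting at lo
--         if n == 0:
--             return lo
--         half = n // 2
--         m = lo + half
--         if nums[m] > target or (nums[m] == target and isSearchingLeftBoundary is True):
--             return go(lo, half)
--         return go(m + 1, n - half - 1)
--     return go(0, len(nums))
-- ===== Notes on version B (the rewrite author's own statement) =====
-- stated objective: alternative
-- what changed: Replaces the iterative while-loop over a pair of moving indices (lo, hi) with a recursive helper over a window described by its start and LENGTH (lo, n), with base case n == 0 and midpoint lo + n//2.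
import Mathlib
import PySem

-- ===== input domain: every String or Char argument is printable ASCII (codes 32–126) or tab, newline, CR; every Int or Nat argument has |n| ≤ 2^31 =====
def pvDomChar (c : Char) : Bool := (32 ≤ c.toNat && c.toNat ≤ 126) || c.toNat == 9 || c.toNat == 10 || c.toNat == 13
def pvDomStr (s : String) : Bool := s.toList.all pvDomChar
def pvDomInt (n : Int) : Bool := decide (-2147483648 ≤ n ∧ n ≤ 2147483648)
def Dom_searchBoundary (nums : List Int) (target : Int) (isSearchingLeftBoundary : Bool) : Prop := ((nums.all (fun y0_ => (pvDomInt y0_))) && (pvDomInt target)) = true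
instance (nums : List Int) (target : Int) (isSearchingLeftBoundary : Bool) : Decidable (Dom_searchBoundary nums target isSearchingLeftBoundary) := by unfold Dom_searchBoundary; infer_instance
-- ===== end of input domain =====

-- B rewrites A's iterative two-index (lo, hi) binary-search loop as a recursive helper over a
-- window described by its start and length (lo, n); objective: alternative decomposition, same cost.

-- ===== PORT A =====
-- the while-loop of A, state (leading_index, ending_index_plus); the `none` branch of the
-- index lookup is unreachable from searchBoundary's call (0 ≤ lo < hi ≤ len nums)
def searchBoundaryLoopA (nums : List Int) (target : Int) (left : Bool) (lo hi : Int) : Int :=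
  if h : lo < hi then
    let mid := PySem.Int.floordiv (lo + hi) 2
    match PySem.List.pyGet? nums mid with
    | none => lo
    | some v =>
      if v > target ∨ (v = target ∧ left = true) then
        searchBoundaryLoopA nums target left lo mid
      else
        searchBoundaryLoopA nums target left (mid + 1) hi
  else lo
termination_by (hi - lo).toNat
decreasing_by
  · have hs : PySem.Int.floordiv (lo + hi) 2 < hi := by
      rw [PySem.Int.floordiv_lt_iff_lt_mul (by omega : (0:Int) < 2)]; omega
    omega
  · have hb := PySem.Int.floordiv_two_mid_bounds (le_of_lt h)
    omega

def searchBoundary (nums : List Int) (target : Int) (isSearchingLeftBoundary : Bool) : Int :=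
  searchBoundaryLoopA nums target isSearchingLeftBoundary 0 (nums.length : Int)

-- ===== PORT B =====
-- B's helper go(lo, n): window of length n starting at lo
def searchBoundaryGoB (nums : List Int) (target : Int) (left : Bool) (lo : Int) (n : Nat) : Int :=
  if n = 0 then lo
  else
    let half := n / 2
    let m := lo + (half : Int)
    match PySem.List.pyGet? nums m with
    | none => lo
    | some v =>
      if v > target ∨ (v = target ∧ left = true) then
        searchBoundaryGoB nums target left lo half
      else
        searchBoundaryGoB nums target left (m + 1) (n - half - 1)
termination_by n
decreasing_by all_goals omega

def searchBoundary_alt (nums : List Int) (target : Int) (isSearchingLeftBoundary : Bool) : Int :=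
  searchBoundaryGoB nums target isSearchingLeftBoundary 0 nums.length

-- ===== PRECONDITION & SPEC =====
def Spec_searchBoundary (nums : List Int) (target : Int) (isSearchingLeftBoundary : Bool) (out : Int) : Prop := out = searchBoundary_alt nums target isSearchingLeftBoundary
instance (nums : List Int) (target : Int) (isSearchingLeftBoundary : Bool) (out : Int) : Decidable (Spec_searchBoundary nums target isSearchingLeftBoundary out) := by unfold Spec_searchBoundary; infer_instance

-- ===== CLAIM (what is proved, stated in full; the proofs are below) =====
def Claim_equal_searchBoundary : Prop := ∀ (nums : List Int) (target : Int) (isSearchingLeftBoundary : Bool), Dom_searchBoundary nums target isSearchingLeftBoundary → Spec_searchBoundary nums target isSearchingLeftBoundary (searchBoundary nums target isSearchingLeftBoundary)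

-- ===== LEMMAS AND PROOFS =====

-- the midpoint of [lo, lo+n) computed Python-style
lemma mid_eq (lo : Int) (n : Nat) :
    PySem.Int.floordiv (lo + (lo + (n : Int))) 2 = lo + ((n / 2 : Nat) : Int) := by
  rw [PySem.Int.floordiv_eq_iff_of_pos (by omega : (0:Int) < 2)]
  have h1 : 2 * (n / 2) ≤ n ∧ n < 2 * (n / 2) + 2 := by omega
  constructor <;> push_cast <;> omega

lemma loop_eq_go (nums : List Int) (target : Int) (left : Bool) :
    ∀ (k : Nat) (lo hi : Int), lo ≤ hi → (hi - lo).toNat = k →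
      searchBoundaryLoopA nums target left lo hi = searchBoundaryGoB nums target left lo k := by
  intro k
  induction k using Nat.strong_induction_on with
  | _ k ih =>
    intro lo hi hle hk
    rw [searchBoundaryLoopA, searchBoundaryGoB]
    by_cases h : lo < hi
    · have hk0 : k ≠ 0 := by omega
      have hhi : hi = lo + (k : Int) := by omega
      simp only [h, dif_pos, if_neg hk0]
      rw [hhi, mid_eq]
      have hhalf : (k / 2 : Nat) < k := Nat.div_lt_self (by omega) (by omega)
      rcases hv : PySem.List.pyGet? nums (lo + ((k / 2 : Nat) : Int)) with _ | v
      · simp [hv]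
      · simp only [hv]
        split
        · exact ih (k / 2) hhalf lo (lo + ((k / 2 : Nat) : Int)) (by omega) (by omega)
        · exact ih (k - k / 2 - 1) (by omega) (lo + ((k / 2 : Nat) : Int) + 1) (lo + (k : Int))
            (by omega) (by omega)
    · have hk0 : k = 0 := by omega
      simp [h, hk0]

-- ===== VERDICT (by name: the statement is the Claim_ definition above) =====
theorem searchBoundary_spec : Claim_equal_searchBoundary := by
  intro nums target left _
  unfold Spec_searchBoundary searchBoundary searchBoundary_alt
  exact loop_eq_go nums target left nums.length 0 (nums.length : Int) (by positivity) (by omega)
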